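-- pv_equiv track=rewrite | github.com/GitNMLee/Console2048 | 2048.py | shift_up
-- ===== SOURCE A (Python) =====
-- num_of_rows = 4
--
-- num_of_cols = 4
--
-- def swap(r1,c1,r2,c2,board):
--     # Given two coordinates on the 2D board, swap them
--     temp = board[r1][c1]
--     board[r1][c1] = board[r2][c2]
--     board[r2][c2] = temp
--     return board
--
-- def shift_up(board):
--     # Shift all cells to the top side of the board
--     for col in range(num_of_cols):
--         for row in range(num_of_rows-1):
--             if (board[row][col] == 0):
--                 # If cell is empty
--                 search_row = row + 1
--                 while (search_row != num_of_rows):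
--                     # Search for non-empty cells to swap
--                     if (board[search_row][col] != 0):
--                         board = swap(row,col,search_row,col,board)
--                         break
--                     search_row += 1
--     # Return modified board
--     return board
-- ===== SOURCE B (Python) =====
-- num_of_rows = 4
--
-- num_of_cols = 4
--
-- def shift_up(board):
--     # Shift all cells to the top side of the board (rebuild each column in place)
--     for col in range(num_of_cols):
--         vals = [board[row][col] for row in range(num_of_rows) if board[row][col] != 0]
--         for row in range(num_of_rows):
--             board[row][col] = vals[row] if row < len(vals) else 0
--     return board
-- ===== Notes on version B (the rewrite author's own statement) =====
-- stated objective: simpler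
-- what changed: Each column is rebuilt in one filter pass (collect nonzero values top-to-bottom, write them back at the top, zero-fill below) instead of A's per-cell search-for-nonzero-below-and-swap with a nested while loop.
import Mathlib
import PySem

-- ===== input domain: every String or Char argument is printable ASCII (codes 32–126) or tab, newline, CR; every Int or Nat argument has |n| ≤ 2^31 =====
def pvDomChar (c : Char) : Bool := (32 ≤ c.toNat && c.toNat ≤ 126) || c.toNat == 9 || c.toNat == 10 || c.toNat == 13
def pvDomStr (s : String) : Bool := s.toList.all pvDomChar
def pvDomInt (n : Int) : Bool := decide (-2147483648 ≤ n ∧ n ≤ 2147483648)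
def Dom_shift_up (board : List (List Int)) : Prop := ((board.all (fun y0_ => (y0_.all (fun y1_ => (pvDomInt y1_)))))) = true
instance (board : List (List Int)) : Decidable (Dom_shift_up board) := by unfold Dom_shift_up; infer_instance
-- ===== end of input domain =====

-- B rebuilds each column with one filter pass (nonzeros to the top, zeros below) instead of
-- A's per-empty-cell search-and-swap; both Pythons mutate the board in place and return it.


-- ===== PORT A =====
-- board[r][c] (valid indices under Pre_)
def getC (b : List (List Int)) (r c : Int) : Int :=
  PySem.List.pyGetD (PySem.List.pyGetD b r []) c 0

-- board[r][c] = v (valid indices under Pre_)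
def setC (b : List (List Int)) (r c : Int) (v : Int) : List (List Int) :=
  PySem.List.pySetD b r (PySem.List.pySetD (PySem.List.pyGetD b r []) c v)

def swap (r1 c1 r2 c2 : Int) (board : List (List Int)) : List (List Int) :=
  let temp := getC board r1 c1
  let board := setC board r1 c1 (getC board r2 c2)
  let board := setC board r2 c2 temp
  board

-- the inner 'while search_row != num_of_rows' loop; the '4 ≤' guard only makes it total
-- (search_row starts ≤ 3 and steps by 1, so it leaves the loop exactly at 4, as in Python)
def searchA (row col searchRow : Int) (board : List (List Int)) : List (List Int) :=
  if 4 ≤ searchRow then board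
  else if getC board searchRow col ≠ 0 then swap row col searchRow col board
  else searchA row col (searchRow + 1) board
termination_by (4 - searchRow).toNat
decreasing_by omega

-- the body of the outer 'for col' loop: the 'for row' loop with its search
def stepA (b : List (List Int)) (col : Int) : List (List Int) :=
  (PySem.List.pyRange 0 (4 - 1) 1).foldl (fun b row =>
    if getC b row col = 0 then searchA row col (row + 1) b else b) b

def shift_up (board : List (List Int)) : List (List Int) :=
  (PySem.List.pyRange 0 4 1).foldl stepA board

-- ===== PORT B =====
-- the body of B's 'for col' loop: collect the column's nonzeros, write them back on top
def stepB (b : List (List Int)) (col : Int) : List (List Int) :=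
  let vals := ((PySem.List.pyRange 0 4 1).map (fun row => getC b row col)).filter (· ≠ 0)
  (PySem.List.pyRange 0 4 1).foldl (fun b row =>
    setC b row col (if row < (vals.length : Int) then PySem.List.pyGetD vals row 0 else 0)) b

def shift_up_alt (board : List (List Int)) : List (List Int) :=
  (PySem.List.pyRange 0 4 1).foldl stepB board

-- ===== PRECONDITION & SPEC =====
-- Pre_ is the 4-row, ≥4-column board shape the game uses.  It excludes a few inputs A still
-- returns on: boards missing a needed row/column are only indexed (and only then raise) when a
-- zero cell forces the downward search, so e.g. an all-nonzero 3-row board slips through A,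
-- while B's single filter pass always reads all four rows and raises there.
def Pre_shift_up (board : List (List Int)) : Prop :=
  4 ≤ board.length ∧ ∀ r ∈ board.take 4, 4 ≤ r.length
instance (board : List (List Int)) : Decidable (Pre_shift_up board) := by
  unfold Pre_shift_up; infer_instance

def pvWitness_shift_up : List (List Int) :=
  [[0, 2, 0, 2], [2, 0, 0, 0], [0, 0, 0, 0], [2, 0, 2, 0]]

def Spec_shift_up (board : List (List Int)) (out : List (List Int)) : Prop := out = shift_up_alt board
instance (board : List (List Int)) (out : List (List Int)) : Decidable (Spec_shift_up board out) := by unfold Spec_shift_up; infer_instance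

-- ===== CLAIM (what is proved, stated in full; the proofs are below) =====
def Claim_equal_shift_up : Prop := ∀ (board : List (List Int)), Dom_shift_up board → Pre_shift_up board → Spec_shift_up board (shift_up board)

-- ===== LEMMAS AND PROOFS =====

-- literal-index evaluation of the cell primitives on a destructured board
lemma g0 (x : Int) (xs : List Int) : PySem.List.pyGetD (x::xs) (0:Int) 0 = x := by simp [pysem]
lemma g1 (x y : Int) (xs : List Int) : PySem.List.pyGetD (x::y::xs) (1:Int) 0 = y := by simp [pysem]
lemma g2 (x y z : Int) (xs : List Int) : PySem.List.pyGetD (x::y::z::xs) (2:Int) 0 = z := by simp [pysem]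
lemma g3 (x y z w : Int) (xs : List Int) : PySem.List.pyGetD (x::y::z::w::xs) (3:Int) 0 = w := by simp [pysem]
lemma s0 (x v : Int) (xs : List Int) : PySem.List.pySetD (x::xs) (0:Int) v = v::xs := by simp [pysem]
lemma s1 (x y v : Int) (xs : List Int) : PySem.List.pySetD (x::y::xs) (1:Int) v = x::v::xs := by simp [pysem]
lemma s2 (x y z v : Int) (xs : List Int) : PySem.List.pySetD (x::y::z::xs) (2:Int) v = x::y::v::xs := by simp [pysem]
lemma s3 (x y z w v : Int) (xs : List Int) : PySem.List.pySetD (x::y::z::w::xs) (3:Int) v = x::y::z::v::xs := by simp [pysem]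
lemma G0 (x : List Int) (xs : List (List Int)) : PySem.List.pyGetD (x::xs) (0:Int) [] = x := by simp [pysem]
lemma G1 (x y : List Int) (xs : List (List Int)) : PySem.List.pyGetD (x::y::xs) (1:Int) [] = y := by simp [pysem]
lemma G2 (x y z : List Int) (xs : List (List Int)) : PySem.List.pyGetD (x::y::z::xs) (2:Int) [] = z := by simp [pysem]
lemma G3 (x y z w : List Int) (xs : List (List Int)) : PySem.List.pyGetD (x::y::z::w::xs) (3:Int) [] = w := by simp [pysem]
lemma S0 (x v : List Int) (xs : List (List Int)) : PySem.List.pySetD (x::xs) (0:Int) v = v::xs := by simp [pysem]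
lemma S1 (x y v : List Int) (xs : List (List Int)) : PySem.List.pySetD (x::y::xs) (1:Int) v = x::v::xs := by simp [pysem]
lemma S2 (x y z v : List Int) (xs : List (List Int)) : PySem.List.pySetD (x::y::z::xs) (2:Int) v = x::y::v::xs := by simp [pysem]
lemma S3 (x y z w v : List Int) (xs : List (List Int)) : PySem.List.pySetD (x::y::z::w::xs) (3:Int) v = x::y::z::v::xs := by simp [pysem]

-- the three one-step behaviours of the inner while loop
lemma searchA_done (row col sr : Int) (b : List (List Int)) (h : 4 ≤ sr) :
    searchA row col sr b = b := by rw [searchA]; simp [h]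
lemma searchA_hit (row col sr : Int) (b : List (List Int)) (hs : ¬ 4 ≤ sr)
    (h : ¬ getC b sr col = 0) : searchA row col sr b = swap row col sr col b := by
  rw [searchA]; simp [hs, h]
lemma searchA_miss (row col sr : Int) (b : List (List Int)) (hs : ¬ 4 ≤ sr)
    (h : getC b sr col = 0) : searchA row col sr b = searchA row col (sr + 1) b := by
  rw [searchA]; simp [hs, h]

-- a board satisfying Pre_ is four rows of four cells (plus arbitrary tails)
lemma shape_destruct (b : List (List Int)) (h : Pre_shift_up b) :
    ∃ (a0 a1 a2 a3 : Int) (t0 : List Int) (b0 b1 b2 b3 : Int) (t1 : List Int)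
      (c0 c1 c2 c3 : Int) (t2 : List Int) (d0 d1 d2 d3 : Int) (t3 : List Int)
      (rest : List (List Int)),
      b = (a0 :: a1 :: a2 :: a3 :: t0) :: (b0 :: b1 :: b2 :: b3 :: t1) ::
          (c0 :: c1 :: c2 :: c3 :: t2) :: (d0 :: d1 :: d2 :: d3 :: t3) :: rest := by
  obtain ⟨hlen, hrow⟩ := h
  rcases b with _ | ⟨r0, b⟩; · simp at hlen
  rcases b with _ | ⟨r1, b⟩; · simp at hlen
  rcases b with _ | ⟨r2, b⟩; · simp at hlen
  rcases b with _ | ⟨r3, b⟩; · simp at hlen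
  have h0 := hrow r0 (by simp)
  have h1 := hrow r1 (by simp)
  have h2 := hrow r2 (by simp)
  have h3 := hrow r3 (by simp)
  rcases r0 with _ | ⟨a0, r0⟩; · simp at h0
  rcases r0 with _ | ⟨a1, r0⟩; · simp at h0
  rcases r0 with _ | ⟨a2, r0⟩; · simp at h0
  rcases r0 with _ | ⟨a3, r0⟩; · simp at h0
  rcases r1 with _ | ⟨b0, r1⟩; · simp at h1
  rcases r1 with _ | ⟨b1, r1⟩; · simp at h1
  rcases r1 with _ | ⟨b2, r1⟩; · simp at h1
  rcases r1 with _ | ⟨b3, r1⟩; · simp at h1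
  rcases r2 with _ | ⟨c0, r2⟩; · simp at h2
  rcases r2 with _ | ⟨c1, r2⟩; · simp at h2
  rcases r2 with _ | ⟨c2, r2⟩; · simp at h2
  rcases r2 with _ | ⟨c3, r2⟩; · simp at h2
  rcases r3 with _ | ⟨d0, r3⟩; · simp at h3
  rcases r3 with _ | ⟨d1, r3⟩; · simp at h3
  rcases r3 with _ | ⟨d2, r3⟩; · simp at h3
  rcases r3 with _ | ⟨d3, r3⟩; · simp at h3
  exact ⟨a0, a1, a2, a3, r0, b0, b1, b2, b3, r1, c0, c1, c2, c3, r2, d0, d1, d2, d3, r3, b, rfl⟩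

set_option maxRecDepth 8192 in
set_option maxHeartbeats 4000000 in
lemma step_eq (c : Int) (hc : c = 0 ∨ c = 1 ∨ c = 2 ∨ c = 3)
    (b : List (List Int)) (h : Pre_shift_up b) : stepA b c = stepB b c := by
  obtain ⟨a0, a1, a2, a3, t0, b0, b1, b2, b3, t1, c0, c1, c2, c3, t2,
    d0, d1, d2, d3, t3, rest, rfl⟩ := shape_destruct b h
  have hr4 : PySem.List.pyRange 0 4 1 = [0, 1, 2, 3] := rfl
  have hr3 : PySem.List.pyRange 0 (4 - 1) 1 = [0, 1, 2] := rfl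
  unfold stepA stepB
  rw [hr3, hr4]
  simp only [List.foldl, List.map]
  rcases hc with rfl | rfl | rfl | rfl
  · simp only [getC, setC, G0, G1, G2, G3, S0, S1, S2, S3, g0, s0]
    by_cases h0 : a0 = 0 <;> by_cases h1 : b0 = 0 <;> by_cases h2 : c0 = 0 <;> by_cases h3 : d0 = 0 <;>
      simp [h0, h1, h2, h3, searchA_done, searchA_hit, searchA_miss, swap, getC, setC,
        G0, G1, G2, G3, S0, S1, S2, S3, g0, g1, g2, g3, s0]
  · simp only [getC, setC, G0, G1, G2, G3, S0, S1, S2, S3, g1, s1]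
    by_cases h0 : a1 = 0 <;> by_cases h1 : b1 = 0 <;> by_cases h2 : c1 = 0 <;> by_cases h3 : d1 = 0 <;>
      simp [h0, h1, h2, h3, searchA_done, searchA_hit, searchA_miss, swap, getC, setC,
        G0, G1, G2, G3, S0, S1, S2, S3, g0, g1, g2, g3, s1]
  · simp only [getC, setC, G0, G1, G2, G3, S0, S1, S2, S3, g2, s2]
    by_cases h0 : a2 = 0 <;> by_cases h1 : b2 = 0 <;> by_cases h2 : c2 = 0 <;> by_cases h3 : d2 = 0 <;>
      simp [h0, h1, h2, h3, searchA_done, searchA_hit, searchA_miss, swap, getC, setC,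
        G0, G1, G2, G3, S0, S1, S2, S3, g0, g1, g2, g3, s2]
  · simp only [getC, setC, G0, G1, G2, G3, S0, S1, S2, S3, g3, s3]
    by_cases h0 : a3 = 0 <;> by_cases h1 : b3 = 0 <;> by_cases h2 : c3 = 0 <;> by_cases h3 : d3 = 0 <;>
      simp [h0, h1, h2, h3, searchA_done, searchA_hit, searchA_miss, swap, getC, setC,
        G0, G1, G2, G3, S0, S1, S2, S3, g0, g1, g2, g3, s3]

lemma stepB_pre (c : Int) (hc : c = 0 ∨ c = 1 ∨ c = 2 ∨ c = 3)
    (b : List (List Int)) (h : Pre_shift_up b) : Pre_shift_up (stepB b c) := by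
  obtain ⟨a0, a1, a2, a3, t0, b0, b1, b2, b3, t1, c0, c1, c2, c3, t2,
    d0, d1, d2, d3, t3, rest, rfl⟩ := shape_destruct b h
  have hr4 : PySem.List.pyRange 0 4 1 = [0, 1, 2, 3] := rfl
  unfold stepB
  rw [hr4]
  simp only [List.foldl, List.map]
  rcases hc with rfl | rfl | rfl | rfl <;>
    simp only [getC, setC, G0, G1, G2, G3, S0, S1, S2, S3, g0, g1, g2, g3, s0, s1, s2, s3] <;>
    refine ⟨by simp, ?_⟩ <;> intro r hr <;> simp [List.take] at hr <;>
    rcases hr with rfl | rfl | rfl | rfl <;> simp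

-- ===== VERDICT (by name: the statement is the Claim_ definition above) =====
theorem shift_up_spec : Claim_equal_shift_up := by
  intro board _ h
  show shift_up board = shift_up_alt board
  have hr : PySem.List.pyRange 0 4 1 = [0, 1, 2, 3] := by decide
  have hA : shift_up board = stepA (stepA (stepA (stepA board 0) 1) 2) 3 := by
    unfold shift_up; rw [hr]; simp only [List.foldl]
  have hB : shift_up_alt board = stepB (stepB (stepB (stepB board 0) 1) 2) 3 := by
    unfold shift_up_alt; rw [hr]; simp only [List.foldl]
  rw [hA, hB]
  rw [step_eq 0 (Or.inl rfl) board h]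
  have h1 := stepB_pre 0 (Or.inl rfl) board h
  rw [step_eq 1 (Or.inr (Or.inl rfl)) _ h1]
  have h2 := stepB_pre 1 (Or.inr (Or.inl rfl)) _ h1
  rw [step_eq 2 (Or.inr (Or.inr (Or.inl rfl))) _ h2]
  have h3 := stepB_pre 2 (Or.inr (Or.inr (Or.inl rfl))) _ h2
  rw [step_eq 3 (Or.inr (Or.inr (Or.inr rfl))) _ h3]
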